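-- pv_equiv track=rewrite | github.com/jaredkoontz/leetcode_py | 1980_find_unique_binary_str/test_find_unique_binary_str.py | findDifferentBinaryString_dfs
-- ===== SOURCE A (Python) =====
-- def findDifferentBinaryString_dfs(nums: list[str]) -> str:
--     ans = []
--
--     def dfs(curr, path, visited):
--         if len(path) == curr:
--             if "".join(path) not in visited:
--                 ans.append(path[:])
--                 return ans
--             return
--         for i in range(2):
--             s = str(i)
--
--             path.append(s)
--             dfs(curr, path, visited)
--             path.pop()
--             if len(ans) == 1:
--                 return
--
--     k = len(nums)
--     vist = set(nums)
--     dfs(k, [], vist)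
--     return "".join(ans[0])
-- ===== SOURCE B (Python) =====
-- def findDifferentBinaryString_dfs(nums: list[str]) -> str:
--     present = set(nums)
--     n = len(nums)
--     for i in range(n + 1):
--         cand = "".join("1" if (i >> (n - 1 - j)) & 1 else "0" for j in range(n))
--         if cand not in present:
--             return cand
--     # unreachable: the n + 1 candidates are distinct, and present has at most n elements
-- ===== Notes on version B (the rewrite author's own statement) =====
-- stated objective: faster
-- what changed: A's recursive DFS that enumerates all 2^n binary strings of length n in lexicographic order is replaced by a direct loop over just the first n+1 binary strings in counting order (the same order), returning the first one not in set(nums), which must exist by pigeonhole.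
import Mathlib
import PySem

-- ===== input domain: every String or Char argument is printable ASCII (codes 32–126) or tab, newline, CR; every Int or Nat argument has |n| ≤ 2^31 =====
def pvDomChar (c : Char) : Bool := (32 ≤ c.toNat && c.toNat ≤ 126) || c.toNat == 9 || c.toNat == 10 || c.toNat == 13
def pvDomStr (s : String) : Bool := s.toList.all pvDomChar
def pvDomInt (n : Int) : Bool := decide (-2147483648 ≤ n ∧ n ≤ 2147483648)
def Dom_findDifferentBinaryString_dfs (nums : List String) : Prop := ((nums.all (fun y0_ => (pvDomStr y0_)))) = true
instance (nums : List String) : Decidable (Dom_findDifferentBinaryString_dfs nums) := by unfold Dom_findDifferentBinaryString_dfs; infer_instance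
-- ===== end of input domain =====

-- B replaces A's exponential DFS over all binary strings of length n by scanning only the
-- first n+1 binary strings of length n in counting order (pigeonhole: one of them is free).

-- ===== PORT A =====
-- Python's inner dfs(curr, path, visited) mutating ans, ported with ans threaded through;
-- fuel only makes the recursion total (the initial fuel k+1 covers the whole recursion depth).
def dfsA (fuel : Nat) (curr : Int) (path : List String) (visited : PySem.Set String)
    (ans : List (List String)) : List (List String) :=
  match fuel with
  | 0 => ans
  | fuel' + 1 =>
    if (path.length : Int) = curr then
      -- if "".join(path) not in visited: ans.append(path[:])
      if !(PySem.Set.contains visited (PySem.Str.join "" path)) then ans ++ [path] else ans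
    else
      -- for i in range(2): path.append(str(i)); dfs(...); path.pop(); if len(ans) == 1: return
      let a1 := dfsA fuel' curr (path ++ ["0"]) visited ans
      if a1.length = 1 then a1
      else dfsA fuel' curr (path ++ ["1"]) visited a1

def findDifferentBinaryString_dfs (nums : List String) : String :=
  let k := nums.length
  let vist := PySem.Set.ofList nums
  let ans := dfsA (k + 1) (k : Int) [] vist []
  -- "".join(ans[0]); ans[0] would raise IndexError only if ans were empty, which never happens
  match ans with
  | p :: _ => PySem.Str.join "" p
  | [] => ""

-- ===== PORT B =====
-- cand = "".join("1" if (i >> (n - 1 - j)) & 1 else "0" for j in range(n))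
def pvBits (n i : Nat) : List String :=
  (List.range n).map (fun j => if (i >>> (n - 1 - j)) &&& 1 = 1 then "1" else "0")

def findDifferentBinaryString_dfs_alt (nums : List String) : String :=
  let present := PySem.Set.ofList nums
  let n := nums.length
  -- for i in range(n + 1): if cand not in present: return cand
  match ((List.range (n + 1)).map (fun i => PySem.Str.join "" (pvBits n i))).find?
      (fun cand => !(PySem.Set.contains present cand)) with
  | some cand => cand
  | none => ""  -- unreachable: the loop always returns before exhausting range(n + 1)

-- ===== PRECONDITION & SPEC =====
def Spec_findDifferentBinaryString_dfs (nums : List String) (out : String) : Prop := out = findDifferentBinaryString_dfs_alt nums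
instance (nums : List String) (out : String) : Decidable (Spec_findDifferentBinaryString_dfs nums out) := by unfold Spec_findDifferentBinaryString_dfs; infer_instance

-- ===== CLAIM (what is proved, stated in full; the proofs are below) =====
def Claim_equal_findDifferentBinaryString_dfs : Prop := ∀ (nums : List String), Dom_findDifferentBinaryString_dfs nums → Spec_findDifferentBinaryString_dfs nums (findDifferentBinaryString_dfs nums)

-- ===== LEMMAS AND PROOFS =====

-- the binary strings of length m (as lists of "0"/"1" parts) in the order A's DFS visits them
def binLists : Nat → List (List String)
  | 0 => [[]]
  | m + 1 => (binLists m).map (List.cons "0") ++ (binLists m).map (List.cons "1")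

-- bit arithmetic: adding 2^m does not change bits below m; bit m of i < 2^m is 0
theorem pvBit_low (i p m : Nat) (hp : p < m) : ((2 ^ m + i) >>> p) &&& 1 = (i >>> p) &&& 1 := by
  simp only [Nat.shiftRight_eq_div_pow, Nat.and_one_is_mod]
  have hm : 2 ^ m = 2 ^ p * (2 * 2 ^ (m - p - 1)) := by
    rw [← pow_succ', ← pow_add]; congr 1; omega
  rw [hm, Nat.mul_add_div (Nat.two_pow_pos p), Nat.add_comm, Nat.add_mul_mod_self_left]

theorem pvBit_high0 (i m : Nat) (h : i < 2 ^ m) : (i >>> m) &&& 1 = 0 := by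
  simp only [Nat.shiftRight_eq_div_pow, Nat.and_one_is_mod]
  rw [Nat.div_eq_of_lt h]

theorem pvBit_high1 (i m : Nat) (h : i < 2 ^ m) : ((2 ^ m + i) >>> m) &&& 1 = 1 := by
  simp only [Nat.shiftRight_eq_div_pow, Nat.and_one_is_mod]
  have h2 : 2 ^ m + i = 2 ^ m * 1 + i := by ring
  rw [h2, Nat.mul_add_div (Nat.two_pow_pos m), Nat.div_eq_of_lt h]

theorem pvBits_succ_low (m i : Nat) (h : i < 2 ^ m) :
    pvBits (m + 1) i = "0" :: pvBits m i := by
  unfold pvBits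
  rw [List.range_succ_eq_map, List.map_cons, List.map_map]
  congr 1
  · simp [pvBit_high0 i m h]
  · apply List.map_congr_left
    intro j hj
    simp only [Function.comp_apply]
    have e1 : m + 1 - 1 - (j + 1) = m - 1 - j := by omega
    rw [e1]

theorem pvBits_succ_high (m i : Nat) (h : i < 2 ^ m) :
    pvBits (m + 1) (2 ^ m + i) = "1" :: pvBits m i := by
  unfold pvBits
  rw [List.range_succ_eq_map, List.map_cons, List.map_map]
  congr 1
  · simp [pvBit_high1 i m h]
  · apply List.map_congr_left
    intro j hj
    simp only [Function.comp_apply, List.mem_range] at *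
    have e1 : m + 1 - 1 - (j + 1) = m - 1 - j := by omega
    rw [e1, pvBit_low i (m - 1 - j) m (by omega)]

-- A's DFS visits exactly B's candidates, in counting order
theorem binLists_eq_map (m : Nat) : binLists m = (List.range (2 ^ m)).map (pvBits m) := by
  induction m with
  | zero => simp [binLists, pvBits]
  | succ m ih =>
    have hsum : 2 ^ (m + 1) = 2 ^ m + 2 ^ m := by ring
    rw [binLists, ih, hsum, List.range_add, List.map_append, List.map_map, List.map_map,
      List.map_map]
    congr 1
    · apply List.map_congr_left
      intro i hi
      simp only [List.mem_range] at hi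
      simp [Function.comp_apply, pvBits_succ_low m i hi]
    · apply List.map_congr_left
      intro i hi
      simp only [List.mem_range] at hi
      simp [Function.comp_apply, pvBits_succ_high m i hi]

-- injectivity of the candidate strings (via their character lists and a decoder)
def pvChars (m i : Nat) : List Char :=
  (List.range m).map (fun j => if (i >>> (m - 1 - j)) &&& 1 = 1 then '1' else '0')

theorem toList_join_pvBits (m i : Nat) :
    (PySem.Str.join "" (pvBits m i)).toList = pvChars m i := by
  rw [PySem.Str.toList_join]
  have h1 : List.map String.toList (pvBits m i) = List.map (fun c => [c]) (pvChars m i) := by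
    unfold pvBits pvChars
    rw [List.map_map, List.map_map]
    apply List.map_congr_left
    intro j hj
    simp only [Function.comp_apply]
    by_cases hb : (i >>> (m - 1 - j)) &&& 1 = 1
    · rw [if_pos hb, if_pos hb]; decide
    · rw [if_neg hb, if_neg hb]; decide
  rw [h1]
  have h2 : ("" : String).toList = [] := rfl
  rw [h2, PySem.Chars.join_nil_singletons]

theorem pvChars_succ_low (m i : Nat) (h : i < 2 ^ m) :
    pvChars (m + 1) i = '0' :: pvChars m i := by
  unfold pvChars
  rw [List.range_succ_eq_map, List.map_cons, List.map_map]
  congr 1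
  · simp [pvBit_high0 i m h]
  · apply List.map_congr_left
    intro j hj
    simp only [Function.comp_apply]
    have e1 : m + 1 - 1 - (j + 1) = m - 1 - j := by omega
    rw [e1]

theorem pvChars_succ_high (m i : Nat) (h : i < 2 ^ m) :
    pvChars (m + 1) (2 ^ m + i) = '1' :: pvChars m i := by
  unfold pvChars
  rw [List.range_succ_eq_map, List.map_cons, List.map_map]
  congr 1
  · simp [pvBit_high1 i m h]
  · apply List.map_congr_left
    intro j hj
    simp only [Function.comp_apply, List.mem_range] at *
    have e1 : m + 1 - 1 - (j + 1) = m - 1 - j := by omega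
    rw [e1, pvBit_low i (m - 1 - j) m (by omega)]

def pvDecode : List Char → Nat → Nat
  | [], a => a
  | c :: cs, a => pvDecode cs (2 * a + (if c = '1' then 1 else 0))

theorem pvDecode_pvChars (m : Nat) : ∀ i a, i < 2 ^ m → pvDecode (pvChars m i) a = a * 2 ^ m + i := by
  induction m with
  | zero =>
    intro i a hi
    interval_cases i
    simp [pvChars, pvDecode]
  | succ m ih =>
    intro i a hi
    by_cases hlow : i < 2 ^ m
    · rw [pvChars_succ_low m i hlow]
      show pvDecode (pvChars m i) (2 * a + (if '0' = '1' then 1 else 0)) = a * 2 ^ (m + 1) + i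
      rw [if_neg (by decide), ih i (2 * a + 0) hlow]
      ring
    · have hi' : i - 2 ^ m < 2 ^ m := by
        have : 2 ^ (m + 1) = 2 ^ m + 2 ^ m := by ring
        omega
      have he : i = 2 ^ m + (i - 2 ^ m) := by omega
      rw [he, pvChars_succ_high m (i - 2 ^ m) hi']
      show pvDecode (pvChars m (i - 2 ^ m)) (2 * a + (if '1' = '1' then 1 else 0)) =
        a * 2 ^ (m + 1) + (2 ^ m + (i - 2 ^ m))
      rw [if_pos rfl, ih (i - 2 ^ m) (2 * a + 1) hi']
      ring

theorem pvCand_inj (m i i' : Nat) (hi : i < 2 ^ m) (hi' : i' < 2 ^ m)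
    (h : PySem.Str.join "" (pvBits m i) = PySem.Str.join "" (pvBits m i')) : i = i' := by
  have hc : pvChars m i = pvChars m i' := by
    rw [← toList_join_pvBits, ← toList_join_pvBits, h]
  have hd := pvDecode_pvChars m i 0 hi
  rw [hc, pvDecode_pvChars m i' 0 hi'] at hd
  omega

-- DFS characterization: with empty ans, dfsA finds the first free completion in DFS order
theorem dfsA_spec (m : Nat) : ∀ (fuel : Nat) (path : List String) (visited : PySem.Set String),
    m < fuel →
    dfsA fuel ((path.length : Int) + (m : Int)) path visited [] =
      (((binLists m).find?
          (fun ext => !(PySem.Set.contains visited (PySem.Str.join "" (path ++ ext))))).map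
        (fun ext => path ++ ext)).toList := by
  induction m with
  | zero =>
    intro fuel path visited hf
    match fuel, hf with
    | fuel' + 1, _ =>
      rw [dfsA]
      rw [if_pos (by push_cast; ring)]
      show _ =
        ((([([] : List String)]).find?
            (fun ext => !(PySem.Set.contains visited (PySem.Str.join "" (path ++ ext))))).map
          (fun ext => path ++ ext)).toList
      by_cases hc : PySem.Str.join "" path ∈ visited <;>
        simp [List.find?, hc, PySem.Set.contains]
  | succ m ih =>
    intro fuel path visited hf
    match fuel, hf with
    | fuel' + 1, hf =>
      have hm : m < fuel' := by omega
      rw [dfsA]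
      rw [if_neg (by push_cast; omega)]
      have hc0 : (path.length : Int) + ((m : Nat) + 1 : Nat) = ((path ++ ["0"]).length : Int) + (m : Int) := by
        push_cast; simp; ring
      have hc1 : (path.length : Int) + ((m : Nat) + 1 : Nat) = ((path ++ ["1"]).length : Int) + (m : Int) := by
        push_cast; simp; ring
      have h0 : dfsA fuel' ((path.length : Int) + ((m : Nat) + 1 : Nat)) (path ++ ["0"]) visited [] =
          (((binLists m).find?
              (fun ext => !(PySem.Set.contains visited (PySem.Str.join "" ((path ++ ["0"]) ++ ext))))).map
            (fun ext => (path ++ ["0"]) ++ ext)).toList := by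
        rw [hc0]; exact ih fuel' (path ++ ["0"]) visited hm
      have h1 : dfsA fuel' ((path.length : Int) + ((m : Nat) + 1 : Nat)) (path ++ ["1"]) visited [] =
          (((binLists m).find?
              (fun ext => !(PySem.Set.contains visited (PySem.Str.join "" ((path ++ ["1"]) ++ ext))))).map
            (fun ext => (path ++ ["1"]) ++ ext)).toList := by
        rw [hc1]; exact ih fuel' (path ++ ["1"]) visited hm
      show _ =
        ((((binLists m).map (List.cons "0") ++ (binLists m).map (List.cons "1")).find?
            (fun ext => !(PySem.Set.contains visited (PySem.Str.join "" (path ++ ext))))).map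
          (fun ext => path ++ ext)).toList
      rw [List.find?_append, List.find?_map, List.find?_map]
      have e0 : ((fun ext => !(PySem.Set.contains visited (PySem.Str.join "" (path ++ ext)))) ∘ List.cons "0")
          = fun ext => !(PySem.Set.contains visited (PySem.Str.join "" ((path ++ ["0"]) ++ ext))) := by
        funext ext; simp
      have e1 : ((fun ext => !(PySem.Set.contains visited (PySem.Str.join "" (path ++ ext)))) ∘ List.cons "1")
          = fun ext => !(PySem.Set.contains visited (PySem.Str.join "" ((path ++ ["1"]) ++ ext))) := by
        funext ext; simp
      rw [e0, e1]
      cases hfind0 : (binLists m).find?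
          (fun ext => !(PySem.Set.contains visited (PySem.Str.join "" ((path ++ ["0"]) ++ ext)))) with
      | some e =>
        rw [hfind0] at h0
        simp only [Option.map_some, Option.toList_some] at h0
        rw [h0]
        simp
      | none =>
        rw [hfind0] at h0
        simp only [Option.map_none, Option.toList_none] at h0
        rw [h0]
        rw [if_neg (by decide)]
        rw [h1]
        cases hfind1 : (binLists m).find?
            (fun ext => !(PySem.Set.contains visited (PySem.Str.join "" ((path ++ ["1"]) ++ ext)))) with
        | some e => simp
        | none => simp

-- pigeonhole: among the first k+1 candidates, one is not in set(nums) (which has ≤ k elements)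
theorem pv_find_isSome (nums : List String) :
    ((List.range (nums.length + 1)).find?
      (fun i => !(PySem.Set.contains (PySem.Set.ofList nums)
        (PySem.Str.join "" (pvBits nums.length i))))).isSome = true := by
  by_contra hcon
  rw [Bool.not_eq_true, Option.isSome_eq_false_iff, Option.isNone_iff_eq_none, List.find?_eq_none] at hcon
  have hbound : nums.length + 1 ≤ 2 ^ nums.length := Nat.lt_two_pow_self
  have hsub : (List.range (nums.length + 1)).map
      (fun i => PySem.Str.join "" (pvBits nums.length i)) ⊆ PySem.Set.ofList nums := by
    intro x hx
    rcases List.mem_map.mp hx with ⟨i, hi, rfl⟩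
    have hct := hcon i hi
    simp at hct
    simpa using hct
  have hnd : ((List.range (nums.length + 1)).map
      (fun i => PySem.Str.join "" (pvBits nums.length i))).Nodup := by
    apply List.Nodup.map_on _ List.nodup_range
    intro x hx y hy hxy
    exact pvCand_inj nums.length x y
      (lt_of_lt_of_le (List.mem_range.mp hx) hbound)
      (lt_of_lt_of_le (List.mem_range.mp hy) hbound) hxy
  have hle := (List.subperm_of_subset hnd hsub).length_le
  rw [List.length_map, List.length_range] at hle
  have hofl := PySem.Set.length_ofList_le nums
  omega

-- ===== VERDICT (by name: the statement is the Claim_ definition above) =====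
theorem findDifferentBinaryString_dfs_spec : Claim_equal_findDifferentBinaryString_dfs := by
  intro nums _
  unfold Spec_findDifferentBinaryString_dfs
  unfold findDifferentBinaryString_dfs findDifferentBinaryString_dfs_alt
  dsimp only
  have hd : dfsA (nums.length + 1) (nums.length : Int) [] (PySem.Set.ofList nums) [] =
      (((binLists nums.length).find?
          (fun ext => !(PySem.Set.contains (PySem.Set.ofList nums) (PySem.Str.join "" ext)))).map
        (fun ext => ext)).toList := by
    have h := dfsA_spec nums.length (nums.length + 1) [] (PySem.Set.ofList nums) (by omega)
    simpa using h
  rw [binLists_eq_map, List.find?_map] at hd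
  have hq : ((fun ext => !(PySem.Set.contains (PySem.Set.ofList nums) (PySem.Str.join "" ext)))
        ∘ pvBits nums.length)
      = fun i => !(PySem.Set.contains (PySem.Set.ofList nums)
          (PySem.Str.join "" (pvBits nums.length i))) := by
    funext i; rfl
  rw [hq] at hd
  have hsplit : 2 ^ nums.length = (nums.length + 1) + (2 ^ nums.length - (nums.length + 1)) := by
    have : nums.length < 2 ^ nums.length := Nat.lt_two_pow_self
    omega
  rw [hsplit, List.range_add, List.find?_append] at hd
  have hfs := pv_find_isSome nums
  cases hfind : (List.range (nums.length + 1)).find?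
      (fun i => !(PySem.Set.contains (PySem.Set.ofList nums)
        (PySem.Str.join "" (pvBits nums.length i)))) with
  | none => rw [hfind] at hfs; simp at hfs
  | some i0 =>
    rw [hfind] at hd
    simp only [Option.some_or, Option.map_some, Option.toList_some] at hd
    rw [hd]
    rw [List.find?_map]
    have hq2 : ((fun cand => !(PySem.Set.contains (PySem.Set.ofList nums) cand))
          ∘ fun i => PySem.Str.join "" (pvBits nums.length i))
        = fun i => !(PySem.Set.contains (PySem.Set.ofList nums)
            (PySem.Str.join "" (pvBits nums.length i))) := by
      funext i; rfl
    rw [hq2, hfind]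
    rfl
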